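-- pv_equiv track=rewrite | github.com/KennyKang-git/zspin | zsim_v1_0/zsim/quantum/geometry.py | edges_from_faces
-- ===== SOURCE A (Python) =====
-- from typing import Iterable
--
-- def edges_from_faces(faces: Iterable[tuple[int, ...]]) -> tuple[tuple[int, int], ...]:
--     edges: set[tuple[int, int]] = set()
--     for face in faces:
--         m = len(face)
--         for i in range(m):
--             a = int(face[i])
--             b = int(face[(i + 1) % m])
--             edges.add((a, b) if a < b else (b, a))
--     return tuple(sorted(edges))
-- ===== SOURCE B (Python) =====
-- from typing import Iterable
--
-- def edges_from_faces(faces: Iterable[tuple[int, ...]]) -> tuple[tuple[int, int], ...]: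
--     # Gather every normalized edge (duplicates included) via a cyclic zip,
--     # then sort once and deduplicate adjacent equals in a single linear pass.
--     all_edges: list[tuple[int, int]] = []
--     for face in faces:
--         all_edges.extend((a, b) if a < b else (b, a)
--                          for a, b in zip(face, face[1:] + face[:1]))
--     all_edges.sort()
--     out: list[tuple[int, int]] = []
--     for e in all_edges:
--         if not out or out[-1] != e:
--             out.append(e)
--     return tuple(out)
-- ===== Notes on version B (the rewrite author's own statement) =====
-- stated objective: alternative
-- what changed: B replaces A's hash-set-with-modular-indexing by a cyclic zip that collects all normalized edges with duplicates, then one sort followed by a linear adjacent-deduplication pass; uniqueness comes from adjacency after sorting, not from hashing during the build.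
import Mathlib
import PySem

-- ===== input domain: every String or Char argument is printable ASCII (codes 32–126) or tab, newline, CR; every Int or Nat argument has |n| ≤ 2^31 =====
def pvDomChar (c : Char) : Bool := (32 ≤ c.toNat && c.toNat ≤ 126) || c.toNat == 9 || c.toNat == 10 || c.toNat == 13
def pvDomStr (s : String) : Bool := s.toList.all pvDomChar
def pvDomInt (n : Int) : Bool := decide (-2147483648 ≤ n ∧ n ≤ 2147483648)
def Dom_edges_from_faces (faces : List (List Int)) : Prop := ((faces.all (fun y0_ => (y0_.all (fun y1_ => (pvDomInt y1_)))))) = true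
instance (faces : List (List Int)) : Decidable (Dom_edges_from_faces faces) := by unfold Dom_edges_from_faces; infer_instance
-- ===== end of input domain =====

-- B collects all normalized edges via a cyclic zip (with duplicates), sorts once, and
-- deduplicates adjacent equals in one linear pass, instead of A's hash set with modular
-- indexing; same cost, different structure (objective: alternative).

-- ===== PORT A =====
-- Indexing face[i] / face[(i+1)%m] is always in range in A (i ∈ range(m), m > 0 there),
-- so pyGetD with default 0 is exact; Python's tuple comparison in sorted() is
-- lexicographic, ported via the key `toLex` into the lexicographic order on Int ×ₗ Int.
def edges_from_faces (faces : List (List Int)) : List (Int × Int) :=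
  let edges : PySem.Set (Int × Int) :=
    faces.foldl (fun edges face =>
      let m : Int := (face.length : Int)
      (PySem.List.pyRange 0 m).foldl (fun edges i =>
        let a := PySem.List.pyGetD face i 0
        let b := PySem.List.pyGetD face (PySem.Int.mod (i + 1) m) 0
        edges.add (if a < b then (a, b) else (b, a))) edges)
      (PySem.Set.ofList [])
  PySem.List.sorted edges (fun e => toLex e)

-- ===== PORT B =====
def edges_from_faces_alt (faces : List (List Int)) : List (Int × Int) :=
  let all_edges : List (Int × Int) :=
    faces.foldl (fun acc face =>
      acc ++ ((face.zip (PySem.List.slice face (some 1) none ++ PySem.List.slice face none (some 1))).map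
        (fun ab => if ab.1 < ab.2 then (ab.1, ab.2) else (ab.2, ab.1)))) []
  let srt := PySem.List.sorted all_edges (fun e => toLex e)
  srt.foldl (fun out e => if out = [] ∨ out.getLast? ≠ some e then out ++ [e] else out) []

-- ===== PRECONDITION & SPEC =====
def Spec_edges_from_faces (faces : List (List Int)) (out : List (Int × Int)) : Prop := out = edges_from_faces_alt faces
instance (faces : List (List Int)) (out : List (Int × Int)) : Decidable (Spec_edges_from_faces faces out) := by unfold Spec_edges_from_faces; infer_instance

-- ===== CLAIM (what is proved, stated in full; the proofs are below) =====
def Claim_equal_edges_from_faces : Prop := ∀ (faces : List (List Int)), Dom_edges_from_faces faces → Spec_edges_from_faces faces (edges_from_faces faces)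

-- ===== LEMMAS AND PROOFS =====

-- the normalized edge list of one face, in B's cyclic-zip form
def pvEdgesOf (face : List Int) : List (Int × Int) :=
  (face.zip (face.drop 1 ++ face.take 1)).map
    (fun ab => if ab.1 < ab.2 then (ab.1, ab.2) else (ab.2, ab.1))

-- recursive form of B's adjacent-dedup fold (prev element as first argument)
def pvDedAux : (Int × Int) → List (Int × Int) → List (Int × Int)
  | _, [] => []
  | p, b :: l => if b = p then pvDedAux p l else b :: pvDedAux b l

-- A's index/modulo traversal of one face produces exactly B's cyclic zip
theorem pvZip_eq (face : List Int) :
    (PySem.List.pyRange 0 (face.length : Int)).map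
      (fun i => (PySem.List.pyGetD face i 0,
                 PySem.List.pyGetD face (PySem.Int.mod (i + 1) (face.length : Int)) 0))
    = face.zip (face.drop 1 ++ face.take 1) := by
  rcases face with _ | ⟨x, xs⟩
  · simp [PySem.List.pyRange]
  set f := x :: xs with hf
  have hlen : 0 < f.length := by simp [hf]
  rw [PySem.List.pyRange_zero_natCast, List.map_map]
  apply List.ext_getElem
  · simp [hf]
  · intro i h1 h2
    simp only [List.getElem_map, List.getElem_range, Function.comp]
    have hi : i < f.length := by simpa using h1
    have hc : ((i : Int) + 1) = ((i + 1 : Nat) : Int) := by push_cast; ring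
    rw [hc, PySem.Int.mod_natCast]
    rw [PySem.List.pyGetD_natCast, PySem.List.pyGetD_natCast]
    have hmod : (i + 1) % f.length < f.length := Nat.mod_lt _ hlen
    rw [List.getD_eq_getElem _ _ hi, List.getD_eq_getElem _ _ hmod]
    rw [List.getElem_zip]
    congr 1
    by_cases hlast : i + 1 < f.length
    · have hm : (i + 1) % f.length = i + 1 := Nat.mod_eq_of_lt hlast
      simp only [hm]
      rw [List.getElem_append_left (by simp; omega)]
      simp
    · have hie : i + 1 = f.length := by omega
      have hm : (i + 1) % f.length = 0 := by rw [hie, Nat.mod_self]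
      simp only [hm]
      rw [List.getElem_append_right (by simp; omega)]
      simp [hf]

theorem pvMem_foldl_add (l : List (Int × Int)) (s : PySem.Set (Int × Int)) (y : Int × Int) :
    y ∈ List.foldl PySem.Set.add s l ↔ y ∈ s ∨ y ∈ l := by
  induction l generalizing s with
  | nil => simp
  | cons x l ih => simp [ih, PySem.Set.mem_add]; tauto

theorem pvNodup_foldl_add (l : List (Int × Int)) (s : PySem.Set (Int × Int)) (h : s.Nodup) :
    (List.foldl PySem.Set.add s l).Nodup := by
  induction l generalizing s with
  | nil => exact h
  | cons x l ih => exact ih _ (PySem.Set.nodup_add s x h)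

-- membership in B's per-face dedup helper, under sortedness and a lower bound
theorem pvDedAux_mem (S : List (Int × Int)) (p y : Int × Int)
    (hs : S.Pairwise (fun a b => toLex a ≤ toLex b))
    (hb : ∀ b ∈ S, toLex p ≤ toLex b) :
    y ∈ pvDedAux p S ↔ y ∈ S ∧ y ≠ p := by
  induction S generalizing p with
  | nil => simp [pvDedAux]
  | cons b l ih =>
    rw [List.pairwise_cons] at hs
    obtain ⟨hbl, hl⟩ := hs
    by_cases hbp : b = p
    · subst hbp
      rw [show pvDedAux b (b::l) = pvDedAux b l from by simp [pvDedAux]]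
      rw [ih b hl hbl]
      constructor
      · rintro ⟨h1, h2⟩; exact ⟨List.mem_cons_of_mem _ h1, h2⟩
      · rintro ⟨h1, h2⟩
        rcases List.mem_cons.mp h1 with h | h
        · exact absurd h h2
        · exact ⟨h, h2⟩
    · simp only [pvDedAux, if_neg hbp]
      rw [List.mem_cons, ih b hl hbl, List.mem_cons]
      constructor
      · rintro (rfl | ⟨h1, h2⟩)
        · exact ⟨Or.inl rfl, hbp⟩
        · refine ⟨Or.inr h1, ?_⟩
          rintro rfl
          have h3 := hbl _ h1
          have h4 := hb _ (List.mem_cons_self)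
          have : toLex b = toLex y := le_antisymm h3 h4
          exact hbp (toLex.injective this)
      · rintro ⟨h1 | h1, h2⟩
        · exact Or.inl h1
        · by_cases hyb : y = b
          · exact Or.inl hyb
          · exact Or.inr ⟨h1, hyb⟩

theorem pvDedAux_pairwise (S : List (Int × Int)) (p : Int × Int)
    (hs : S.Pairwise (fun a b => toLex a ≤ toLex b))
    (hb : ∀ b ∈ S, toLex p ≤ toLex b) :
    (p :: pvDedAux p S).Pairwise (fun a b => toLex a < toLex b) := by
  induction S generalizing p with
  | nil => simp [pvDedAux]
  | cons b l ih =>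
    rw [List.pairwise_cons] at hs
    obtain ⟨hbl, hl⟩ := hs
    by_cases hbp : b = p
    · subst hbp
      simpa [pvDedAux] using ih b hl hbl
    · simp only [pvDedAux, if_neg hbp]
      have hpb : toLex p < toLex b := by
        refine lt_of_le_of_ne (hb _ List.mem_cons_self) ?_
        intro h
        exact hbp (toLex.injective h).symm
      have htail := ih b hl hbl
      rw [List.pairwise_cons]
      refine ⟨?_, htail⟩
      intro y hy
      rcases List.mem_cons.mp hy with rfl | hy'
      · exact hpb
      · have : y ∈ l := ((pvDedAux_mem l b y hl hbl).mp hy').1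
        exact lt_of_lt_of_le hpb (hbl _ this)

-- B's dedup fold, in recursive form
theorem pvFold_ded (S : List (Int × Int)) (acc : List (Int × Int)) (p : Int × Int)
    (h : acc.getLast? = some p) :
    S.foldl (fun out e => if out = [] ∨ out.getLast? ≠ some e then out ++ [e] else out) acc
      = acc ++ pvDedAux p S := by
  induction S generalizing acc p with
  | nil => simp [pvDedAux]
  | cons e S ih =>
    have hne : acc ≠ [] := by rintro rfl; simp at h
    simp only [List.foldl_cons]
    by_cases hep : e = p
    · subst hep
      rw [if_neg (by simp [hne, h])]
      rw [ih acc _ h]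
      simp [pvDedAux]
    · rw [if_pos (Or.inr (by rw [h]; exact fun hc => hep (Option.some.inj hc).symm))]
      rw [ih (acc ++ [e]) e (by simp)]
      simp [pvDedAux, if_neg hep]

theorem pvMem_outer (faces : List (List Int)) (s : PySem.Set (Int × Int)) (y : Int × Int) :
    (y ∈ faces.foldl (fun s f => List.foldl PySem.Set.add s (pvEdgesOf f)) s) ↔
      y ∈ s ∨ y ∈ faces.flatMap pvEdgesOf := by
  induction faces generalizing s with
  | nil => simp
  | cons f fs ih => simp [ih, pvMem_foldl_add]; tauto

theorem pvNodup_outer (faces : List (List Int)) (s : PySem.Set (Int × Int)) (h : s.Nodup) :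
    (faces.foldl (fun s f => List.foldl PySem.Set.add s (pvEdgesOf f)) s).Nodup := by
  induction faces generalizing s with
  | nil => exact h
  | cons f fs ih => exact ih _ (pvNodup_foldl_add _ _ h)

theorem edges_from_faces_spec_aux (faces : List (List Int)) :
    edges_from_faces faces = edges_from_faces_alt faces := by
  unfold edges_from_faces edges_from_faces_alt
  -- rewrite A's per-face index loop into a fold of Set.add over pvEdgesOf
  have hA : (fun (edges : PySem.Set (Int × Int)) (face : List Int) =>
      (PySem.List.pyRange 0 ((face.length : Int))).foldl (fun edges i =>
        let a := PySem.List.pyGetD face i 0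
        let b := PySem.List.pyGetD face (PySem.Int.mod (i + 1) ((face.length : Int))) 0
        edges.add (if a < b then (a, b) else (b, a))) edges)
      = (fun s face => List.foldl PySem.Set.add s (pvEdgesOf face)) := by
    funext s face
    show (PySem.List.pyRange 0 ((face.length : Int))).foldl
        (fun s i => s.add
          (if (PySem.List.pyGetD face i 0) < (PySem.List.pyGetD face (PySem.Int.mod (i + 1) ((face.length : Int))) 0)
           then ((PySem.List.pyGetD face i 0), (PySem.List.pyGetD face (PySem.Int.mod (i + 1) ((face.length : Int))) 0))
           else ((PySem.List.pyGetD face (PySem.Int.mod (i + 1) ((face.length : Int))) 0), (PySem.List.pyGetD face i 0)))) s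
        = List.foldl PySem.Set.add s (pvEdgesOf face)
    rw [show (pvEdgesOf face) =
        ((PySem.List.pyRange 0 ((face.length : Int))).map
          (fun i => (PySem.List.pyGetD face i 0,
                     PySem.List.pyGetD face (PySem.Int.mod (i + 1) ((face.length : Int))) 0))).map
          (fun ab => if ab.1 < ab.2 then (ab.1, ab.2) else (ab.2, ab.1)) from by
      rw [pvZip_eq]; rfl]
    rw [List.foldl_map, List.foldl_map]
  rw [hA]
  -- rewrite B's per-face slice expression into pvEdgesOf
  have hB : (fun (acc : List (Int × Int)) (face : List Int) =>
      acc ++ ((face.zip (PySem.List.slice face (some 1) none ++ PySem.List.slice face none (some 1))).map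
        (fun ab => if ab.1 < ab.2 then (ab.1, ab.2) else (ab.2, ab.1))))
      = (fun acc face => acc ++ pvEdgesOf face) := by
    funext acc face
    rw [PySem.List.slice_from face (by norm_num), PySem.List.slice_to face (by norm_num)]
    rfl
  rw [hB, PySem.List.foldl_append_eq_flatMap pvEdgesOf faces []]
  simp only [List.nil_append]
  set L : List (Int × Int) := faces.flatMap pvEdgesOf with hL
  set setS : PySem.Set (Int × Int) := faces.foldl
      (fun s f => List.foldl PySem.Set.add s (pvEdgesOf f)) (PySem.Set.ofList []) with hsetS
  have hmemS : ∀ y, y ∈ setS ↔ y ∈ L := by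
    intro y
    rw [hsetS, pvMem_outer]
    simp [hL, List.mem_flatMap]
  have hnd : setS.Nodup := pvNodup_outer _ _ (PySem.Set.nodup_ofList [])
  have hSp := PySem.List.sorted_pairwise L (fun e => toLex e)
  have hSperm : (PySem.List.sorted L (fun e => toLex e)).Perm L :=
    PySem.List.sorted_perm L (fun e => toLex e) false
  rcases hS : PySem.List.sorted L (fun e => toLex e) with _ | ⟨e, S'⟩
  · -- sorted L is empty: L = [], so the set is empty too
    rw [hS] at hSperm
    have hLnil : L = [] := hSperm.symm.eq_nil
    have : setS = [] := by
      apply List.eq_nil_iff_forall_not_mem.mpr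
      intro y hy
      rw [hLnil] at hmemS
      exact absurd ((hmemS y).mp hy) (List.not_mem_nil)
    rw [this]
    simp [PySem.List.sorted]
  · rw [hS] at hSperm hSp
    rw [List.pairwise_cons] at hSp
    obtain ⟨hb, hS'p⟩ := hSp
    -- B's dedup fold in recursive form
    have hBout : (e :: S').foldl
        (fun out e => if out = [] ∨ out.getLast? ≠ some e then out ++ [e] else out) []
        = e :: pvDedAux e S' := by
      simp only [List.foldl_cons, List.nil_append]
      exact pvFold_ded S' [e] e (by simp)
    rw [hBout]
    -- A's sorted set equals the same strictly sorted list
    apply PySem.List.sorted_eq_of_perm_of_pairwise_lt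
    · rw [List.perm_ext_iff_of_nodup ?_ hnd]
      · intro y
        rw [hmemS y, ← hSperm.mem_iff, List.mem_cons, List.mem_cons,
          pvDedAux_mem S' e y hS'p hb]
        constructor
        · rintro (rfl | ⟨h1, _⟩)
          · exact Or.inl rfl
          · exact Or.inr h1
        · rintro (rfl | h1)
          · exact Or.inl rfl
          · by_cases hye : y = e
            · exact Or.inl hye
            · exact Or.inr ⟨h1, hye⟩
      · have hpw := pvDedAux_pairwise S' e hS'p hb
        exact hpw.imp (fun {a b} hab => by rintro rfl; exact lt_irrefl _ hab)
    · exact pvDedAux_pairwise S' e hS'p hb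

-- ===== VERDICT (by name: the statement is the Claim_ definition above) =====
theorem edges_from_faces_spec : Claim_equal_edges_from_faces := by
  intro faces _
  exact edges_from_faces_spec_aux faces
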